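-- pv_equiv track=rewrite | github.com/Sccotliu/refreshing | python/utility/lj/path.py | comparePath
-- ===== SOURCE A (Python) =====
-- def comparePath(path1, path2):
--     if not path1 or not path1:
--         return 2
--
--     path1Len =  len(path1)
--     path2Len =  len(path2)
--
--     if path1Len > path2Len:
--         longPath = path1
--         shortPath = path2
--         cmpFator  = 1
--     else:
--         longPath = path2
--         shortPath = path1
--         cmpFator  = -1
--
--     shortPathLen = len(shortPath)
--     longPathLen = len(longPath)
--     i = 0
--     j = 0
--     while i < shortPathLen and j < longPathLen:
--         c1 = shortPath[i]
--         c2 = longPath[j]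
--         if isSlash(c1):
--             if not isSlash(c2):
--                 return 2
--             while i < shortPathLen and isSlash(shortPath[i]):
--                 i += 1
--             while j < longPathLen and isSlash(longPath[j]):
--                 j += 1
--         else:
--             if c1 != c2:
--                 if i == shortPathLen:
--                     return cmpFator
--                 else:
--                     return 2
--             i += 1
--             j += 1
--
--     if i == shortPathLen:
--         if j == longPathLen:
--             return 0
--         while j < longPathLen:
--             if not isSlash(longPath[j]):
--                 return cmpFator
--             j += 1
--         return 0
--     else:
--         return 2
--
-- def isSlash(c):
--     return c == '/' or c == '\\'
-- ===== SOURCE B (Python) =====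
-- # Tokenize each path once (slash runs -> one SEP sentinel), then do a single
-- # prefix comparison of token lists instead of A's interleaved two-index walk.
-- SEP = None
--
-- def _tokens(p):
--     toks = []
--     i = 0
--     n = len(p)
--     while i < n:
--         if p[i] == '/' or p[i] == '\\':
--             toks.append(SEP)
--             while i < n and (p[i] == '/' or p[i] == '\\'):
--                 i += 1
--         else:
--             toks.append(p[i])
--             i += 1
--     return toks
--
-- def comparePath(path1, path2):
--     if not path1:
--         return 2
--     if len(path1) > len(path2):
--         long_t, short_t, cf = _tokens(path1), _tokens(path2), 1
--     else:
--         long_t, short_t, cf = _tokens(path2), _tokens(path1), -1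
--     n = len(short_t)
--     if long_t[:n] != short_t:
--         return 2
--     rest = long_t[n:]
--     if rest == [] or rest == [SEP]:
--         return 0
--     return cf
-- ===== Notes on version B (the rewrite author's own statement) =====
-- stated objective: alternative
-- what changed: B tokenizes each path in one pass (every maximal slash run becomes a single SEP sentinel, other characters stay as they are) and then decides by a single prefix comparison of the two token lists plus a look at the leftover, replacing A's interleaved two-index character walk with nested slash-skipping loops.
import Mathlib
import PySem

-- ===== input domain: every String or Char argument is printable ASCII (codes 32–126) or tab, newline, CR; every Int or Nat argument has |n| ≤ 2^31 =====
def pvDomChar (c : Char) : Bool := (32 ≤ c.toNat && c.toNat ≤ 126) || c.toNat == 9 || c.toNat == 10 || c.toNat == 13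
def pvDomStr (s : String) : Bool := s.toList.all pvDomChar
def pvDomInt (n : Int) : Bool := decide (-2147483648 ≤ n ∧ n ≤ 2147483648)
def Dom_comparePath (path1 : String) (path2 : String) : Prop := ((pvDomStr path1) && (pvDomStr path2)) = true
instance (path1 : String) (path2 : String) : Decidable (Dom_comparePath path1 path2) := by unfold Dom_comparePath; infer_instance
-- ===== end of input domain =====

-- B tokenizes each path once (a slash run becomes one SEP token) and compares the
-- token lists by a single prefix test, instead of A's interleaved two-index walk.

-- ===== PORT A =====
def isSlashA (c : Char) : Bool := c == '/' || c == '\\'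

-- the main while loop of A, consuming shortPath and longPath as char lists
def loopA (cf : Int) : List Char → List Char → Int
  | [], [] => 0                                   -- i == shortLen, j == longLen → 0
  | [], l  => if l.all isSlashA then 0 else cf    -- trailing scan of longPath
  | _ :: _, [] => 2                               -- i < shortLen, j == longLen → 2
  | c1 :: s, c2 :: l =>
    if isSlashA c1 then
      if !isSlashA c2 then 2
      else loopA cf (s.dropWhile isSlashA) (l.dropWhile isSlashA)  -- skip both slash runs
    else
      if c1 != c2 then 2   -- (A's inner 'i == shortPathLen' test is unreachable here)
      else loopA cf s l
termination_by s l => s.length + l.length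
decreasing_by
  · have h1 := List.length_dropWhile_le isSlashA s
    have h2 := List.length_dropWhile_le isSlashA l
    simp; omega
  · simp; omega

def comparePath (path1 : String) (path2 : String) : Int :=
  if path1.isEmpty || path1.isEmpty then 2
  else
    let p1 := path1.toList
    let p2 := path2.toList
    if p1.length > p2.length then loopA 1 p2 p1 else loopA (-1) p1 p2

-- ===== PORT B =====
inductive Tok
  | sep
  | ch : Char → Tok
deriving DecidableEq, Repr

def isSlashB (c : Char) : Bool := c == '/' || c == '\\'

def tokensB : List Char → List Tok
  | [] => []
  | c :: cs =>
    if isSlashB c then Tok.sep :: tokensB (cs.dropWhile isSlashB)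
    else Tok.ch c :: tokensB cs
termination_by cs => cs.length
decreasing_by
  · have := List.length_dropWhile_le isSlashB cs
    simp; omega
  · simp

def comparePath_alt (path1 : String) (path2 : String) : Int :=
  if path1.isEmpty then 2
  else
    let t1 := tokensB path1.toList
    let t2 := tokensB path2.toList
    let lsc : List Tok × List Tok × Int :=
      if path1.toList.length > path2.toList.length then (t1, t2, 1) else (t2, t1, -1)
    let longT := lsc.1
    let shortT := lsc.2.1
    let cf := lsc.2.2
    let n := shortT.length
    if longT.take n ≠ shortT then 2
    else
      let rest := longT.drop n
      if rest = [] ∨ rest = [Tok.sep] then 0 else cf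

-- ===== PRECONDITION & SPEC =====
def Spec_comparePath (path1 : String) (path2 : String) (out : Int) : Prop := out = comparePath_alt path1 path2
instance (path1 : String) (path2 : String) (out : Int) : Decidable (Spec_comparePath path1 path2 out) := by unfold Spec_comparePath; infer_instance

-- ===== CLAIM (what is proved, stated in full; the proofs are below) =====
def Claim_equal_comparePath : Prop := ∀ (path1 : String) (path2 : String), Dom_comparePath path1 path2 → Spec_comparePath path1 path2 (comparePath path1 path2)

-- ===== LEMMAS AND PROOFS =====

-- B's decision on token lists, as a closed function
def specB (cf : Int) (ts tl : List Tok) : Int :=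
  if tl.take ts.length = ts then
    (if tl.drop ts.length = [] ∨ tl.drop ts.length = [Tok.sep] then 0 else cf)
  else 2

lemma tokensB_nil_iff (xs : List Char) : tokensB xs = [] ↔ xs = [] := by
  cases xs with
  | nil => simp [tokensB]
  | cons c cs => rw [tokensB]; split <;> simp

lemma isSlash_eq : isSlashA = isSlashB := rfl

lemma loopA_eq_specB (cf : Int) (s l : List Char) :
    loopA cf s l = specB cf (tokensB s) (tokensB l) := by
  induction s, l using loopA.induct with
  | case1 => simp [loopA, tokensB, specB]
  | case2 l hl hall =>
    rw [isSlash_eq] at hall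
    cases l with
    | nil => exact absurd rfl hl
    | cons c cs =>
      simp only [List.all_cons, Bool.and_eq_true] at hall
      have hdw : cs.dropWhile isSlashB = [] :=
        List.dropWhile_eq_nil_iff.mpr (by intro x hx; exact (List.all_eq_true.mp hall.2) x hx)
      simp [loopA, isSlash_eq, tokensB, hall.1, hall.2, hdw, specB]
  | case3 l hl hall =>
    rw [isSlash_eq] at hall
    cases l with
    | nil => exact absurd rfl hl
    | cons c cs =>
      by_cases hc : isSlashB c
      · have hcs : ¬ cs.all isSlashB := by
          intro h; exact hall (by simp [hc, h])
        have hdw : cs.dropWhile isSlashB ≠ [] := by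
          intro h
          exact hcs (List.all_eq_true.mpr (fun x hx => List.dropWhile_eq_nil_iff.mp h x hx))
        have hdw2 : tokensB (cs.dropWhile isSlashB) ≠ [] :=
          fun h => hdw ((tokensB_nil_iff _).mp h)
        simp [loopA, isSlash_eq, tokensB, hc, hall, specB, hdw2]
      · simp [loopA, isSlash_eq, tokensB, hc, hall, specB]
  | case4 c s =>
    by_cases hc : isSlashB c <;> simp [loopA, tokensB, hc, specB]
  | case5 c1 s c2 l h1 h2 =>
    rw [isSlash_eq] at h1 h2
    have h2' : isSlashB c2 = false := by simpa using h2
    simp [loopA, isSlash_eq, tokensB, h1, h2', specB]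
  | case6 c1 s c2 l h1 h2 ih =>
    rw [isSlash_eq] at h1 h2 ih
    have h2' : isSlashB c2 = true := by simpa using h2
    simp only [loopA, isSlash_eq, h1, h2', Bool.not_true, if_true, if_false,
      Bool.false_eq_true]
    rw [ih]
    simp [tokensB, h1, h2', specB]
  | case7 c1 s c2 l h1 h2 =>
    rw [isSlash_eq] at h1
    have h1' : isSlashB c1 = false := by simpa using h1
    have hne : c2 ≠ c1 := fun h => by simp [h] at h2
    by_cases hc2 : isSlashB c2
    · simp [loopA, isSlash_eq, tokensB, h1', h2, hc2, specB]
    · simp [loopA, isSlash_eq, tokensB, h1', h2, hc2, specB, hne]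
  | case8 c1 s c2 l h1 h2 ih =>
    rw [isSlash_eq] at h1
    have h1' : isSlashB c1 = false := by simpa using h1
    have hc : c1 = c2 := by simpa using h2
    have h2'' : (c1 != c2) = false := by simpa using h2
    simp only [loopA, isSlash_eq, h1', h2'', Bool.false_eq_true, if_false]
    rw [ih]
    subst hc
    simp [tokensB, h1', specB]

lemma alt_eq_specB (path1 path2 : String) (h : ¬ path1.isEmpty) :
    comparePath_alt path1 path2 =
      if path1.toList.length > path2.toList.length then
        specB 1 (tokensB path2.toList) (tokensB path1.toList)
      else
        specB (-1) (tokensB path1.toList) (tokensB path2.toList) := by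
  rw [comparePath_alt, if_neg (by simpa using h)]
  by_cases hlen : path1.toList.length > path2.toList.length <;>
    simp only [hlen, if_pos, if_false, specB] <;>
    split <;> simp_all

-- ===== VERDICT (by name: the statement is the Claim_ definition above) =====
theorem comparePath_spec : Claim_equal_comparePath := by
  intro path1 path2 _
  unfold Spec_comparePath comparePath
  by_cases h : path1.isEmpty
  · simp [h, comparePath_alt]
  · rw [if_neg (by simpa using h), alt_eq_specB path1 path2 h]
    by_cases hlen : path1.toList.length > path2.toList.length <;>
      simp [loopA_eq_specB]
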